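-- pv_equiv track=rewrite | github.com/openu-cs-degree/20606-Programming-and-Data-Analysis-in-Python | preparation.py | biggest_sum_row
-- ===== SOURCE A (Python) =====
-- def index_of(num: int, lst: list) -> int:
--     """Return the index of the number in the list."""
--     if not lst:
--         return -1
--     if lst[0] == num:
--         return 0
--     index = index_of(num, lst[1:])
--     if index != -1:
--         index += 1
--     return index
--
-- def biggest_sum(lst):
--     """Return the biggest sum of integers between 2 zeroes in the list."""
--     max_sum = 0
--     curr_sum = 0
--
--     for num in lst[index_of(0, lst) + 1 :]:
--         if num == 0:
--             max_sum = max(max_sum, curr_sum)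
--             curr_sum = 0
--         else:
--             curr_sum += num
--
--     return max_sum
--
-- def biggest_sum_row(mat):
--     """Return the index of the row with the biggest sum of integers between 2 zeroes."""
--     if not mat:
--         return None
--
--     max_sum = 0
--     max_index = 0
--
--     for i in range(len(mat)):
--         curr_sum = biggest_sum(mat[i])
--         if curr_sum > max_sum:
--             max_sum = curr_sum
--             max_index = i
--
--     return max_index
-- ===== SOURCE B (Python) =====
-- def _row_best(row):
--     """Max sum of a segment strictly between two zeros, one left-to-right pass."""
--     best = 0
--     cur = 0
--     seen = False
--     for x in row:
--         if x == 0: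
--             if seen and cur > best:
--                 best = cur
--             cur = 0
--             seen = True
--         elif seen:
--             cur += x
--     return best
--
-- def biggest_sum_row(mat):
--     if not mat:
--         return None
--     best_i = 0
--     best_s = 0
--     for i, row in enumerate(mat):
--         s = _row_best(row)
--         if s > best_s:
--             best_i, best_s = i, s
--     return best_i
-- ===== Notes on version B (the rewrite author's own statement) =====
-- stated objective: faster
-- what changed: B scans each row once with a seen-a-zero flag instead of A's recursive list-slicing index_of plus a slice, and picks the best row with a single enumerate loop.
import Mathlib
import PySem

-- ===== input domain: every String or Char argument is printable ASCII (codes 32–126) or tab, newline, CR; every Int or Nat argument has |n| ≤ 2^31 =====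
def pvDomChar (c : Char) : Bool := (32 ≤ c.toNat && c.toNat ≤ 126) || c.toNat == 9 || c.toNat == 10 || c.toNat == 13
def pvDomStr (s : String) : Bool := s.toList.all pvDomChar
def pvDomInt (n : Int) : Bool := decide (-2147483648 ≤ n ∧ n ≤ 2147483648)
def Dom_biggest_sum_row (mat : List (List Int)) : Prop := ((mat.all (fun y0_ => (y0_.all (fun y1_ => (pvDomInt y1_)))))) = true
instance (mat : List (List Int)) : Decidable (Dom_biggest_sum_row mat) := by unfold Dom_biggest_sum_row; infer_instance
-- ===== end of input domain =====

-- B replaces A's recursive slicing index_of and per-row slice by a single seen-a-zero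
-- flagged pass per row (O(m·n) instead of A's O(m·n^2)); return value only, no mutation.

-- ===== PORT A =====
def index_of (num : Int) (lst : List Int) : Int :=
  match lst with
  | [] => -1
  | x :: t =>
    if x = num then 0
    else
      let index := index_of num t
      if index ≠ -1 then index + 1 else index

def biggest_sum (lst : List Int) : Int :=
  let st := (PySem.List.slice lst (some (index_of 0 lst + 1)) none).foldl
    (fun (s : Int × Int) num =>
      if num = 0 then (max s.1 s.2, 0) else (s.1, s.2 + num)) (0, 0)
  st.1

def biggest_sum_row (mat : List (List Int)) : Option Int :=
  if mat = [] then none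
  else
    let st := (PySem.List.pyRange 0 mat.length 1).foldl
      (fun (s : Int × Int) i =>
        let curr := biggest_sum (PySem.List.pyGetD mat i [])
        if curr > s.1 then (curr, i) else s) (0, 0)
    some st.2

-- ===== PORT B =====
def row_best (row : List Int) : Int :=
  (row.foldl
    (fun (st : Int × Int × Bool) x =>
      if x = 0 then
        (if st.2.2 ∧ st.2.1 > st.1 then st.2.1 else st.1, 0, true)
      else if st.2.2 then (st.1, st.2.1 + x, true) else st) (0, 0, false)).1

def biggest_sum_row_alt (mat : List (List Int)) : Option Int :=
  match mat with
  | [] => none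
  | _ :: _ =>
    let st := (PySem.List.enumerate mat 0).foldl
      (fun (s : Int × Int) p =>
        let v := row_best p.2
        if v > s.2 then (p.1, v) else s) (0, 0)
    some st.1

-- ===== PRECONDITION & SPEC =====
def Spec_biggest_sum_row (mat : List (List Int)) (out : Option Int) : Prop := out = biggest_sum_row_alt mat
instance (mat : List (List Int)) (out : Option Int) : Decidable (Spec_biggest_sum_row mat out) := by unfold Spec_biggest_sum_row; infer_instance

-- ===== CLAIM (what is proved, stated in full; the proofs are below) =====
def Claim_equal_biggest_sum_row : Prop := ∀ (mat : List (List Int)), Dom_biggest_sum_row mat → Spec_biggest_sum_row mat (biggest_sum_row mat)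

-- ===== LEMMAS AND PROOFS =====

-- A's inner fold body / B's inner fold body, named for the lemmas.
def stepA (s : Int × Int) (num : Int) : Int × Int :=
  if num = 0 then (max s.1 s.2, 0) else (s.1, s.2 + num)

def stepB (st : Int × Int × Bool) (x : Int) : Int × Int × Bool :=
  if x = 0 then
    (if st.2.2 ∧ st.2.1 > st.1 then st.2.1 else st.1, 0, true)
  else if st.2.2 then (st.1, st.2.1 + x, true) else st

theorem biggest_sum_eq (l : List Int) :
    biggest_sum l = ((PySem.List.slice l (some (index_of 0 l + 1)) none).foldl stepA (0, 0)).1 := rfl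

theorem row_best_eq (l : List Int) :
    row_best l = (l.foldl stepB (0, 0, false)).1 := rfl

theorem index_of_nonneg_or (num : Int) (l : List Int) :
    index_of num l = -1 ∨ 0 ≤ index_of num l := by
  induction l with
  | nil => simp [index_of]
  | cons x t ih =>
    by_cases hx : x = num
    · simp [index_of, hx]
    · simp only [index_of, hx, if_false]
      by_cases h1 : index_of num t = -1 <;> simp [h1] <;> omega

theorem index_of_neg_one_iff (num : Int) (l : List Int) :
    index_of num l = -1 ↔ num ∉ l := by
  induction l with
  | nil => simp [index_of]
  | cons x t ih =>
    by_cases hx : x = num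
    · simp [index_of, hx]
    · simp only [index_of, hx, if_false, List.mem_cons]
      by_cases h : index_of num t = -1
      · simp only [ne_eq, h, not_true_eq_false, if_false, true_iff]
        intro hc
        rcases hc with hc | hc
        · exact hx hc.symm
        · exact (ih.mp h) hc
      · simp only [ne_eq, h, not_false_eq_true, if_true]
        constructor
        · intro habs
          rcases index_of_nonneg_or num t with h' | h' <;> omega
        · intro hnm
          exact absurd (ih.mpr (fun hm => hnm (Or.inr hm))) h

-- A's fold leaves max_sum untouched on a zero-free list.
theorem foldA_no_zero (l : List Int) (hb : (0:Int) ∉ l) (b c : Int) :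
    (l.foldl stepA (b, c)).1 = b := by
  induction l generalizing c with
  | nil => rfl
  | cons x t ih =>
    simp only [List.mem_cons, not_or] at hb
    rw [List.foldl_cons, show stepA (b, c) x = (b, c + x) from by
      simp [stepA, Ne.symm hb.1]]
    exact ih hb.2 _

-- B's state is inert before the first zero.
theorem foldB_no_zero (l : List Int) (hb : (0:Int) ∉ l) :
    l.foldl stepB (0, 0, false) = (0, 0, false) := by
  induction l with
  | nil => rfl
  | cons x t ih =>
    simp only [List.mem_cons, not_or] at hb
    rw [List.foldl_cons, show stepB (0, 0, false) x = (0, 0, false) from by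
      simp [stepB, Ne.symm hb.1]]
    exact ih hb.2

-- Once the flag is set, B's fold mirrors A's fold.
theorem foldB_seen (l : List Int) (b c : Int) :
    l.foldl stepB (b, c, true) =
      ((l.foldl stepA (b, c)).1, (l.foldl stepA (b, c)).2, true) := by
  induction l generalizing b c with
  | nil => rfl
  | cons x t ih =>
    by_cases hx : x = 0
    · subst hx
      rw [List.foldl_cons, List.foldl_cons,
        show stepB (b, c, true) 0 = (max b c, 0, true) from by
          simp only [stepB, Prod.ext_iff]
          norm_num
          split_ifs <;> simp_all <;> omega,
        show stepA (b, c) 0 = (max b c, 0) from by simp [stepA]]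
      exact ih _ _
    · rw [List.foldl_cons, List.foldl_cons,
        show stepB (b, c, true) x = (b, c + x, true) from by simp [stepB, hx],
        show stepA (b, c) x = (b, c + x) from by simp [stepA, hx]]
      exact ih _ _

theorem biggest_sum_eq_row_best (l : List Int) : biggest_sum l = row_best l := by
  induction l with
  | nil => rfl
  | cons x t ih =>
    by_cases hx : x = 0
    · subst hx
      have h1 : index_of 0 (0 :: t) = 0 := by simp [index_of]
      have h2 : PySem.List.slice (0 :: t) (some (0 + 1)) none = t := by
        simpa using PySem.List.slice_from_one (0 :: t)
      rw [biggest_sum_eq, h1, h2, row_best_eq, List.foldl_cons,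
        show stepB (0, 0, false) 0 = (0, 0, true) from by simp [stepB],
        foldB_seen]
    · have hrB : row_best (x :: t) = row_best t := by
        rw [row_best_eq, row_best_eq, List.foldl_cons,
          show stepB (0, 0, false) x = (0, 0, false) from by simp [stepB, hx]]
      rcases index_of_nonneg_or 0 t with hneg | hpos
      · -- no zero anywhere: both sides are 0
        have hnot : (0:Int) ∉ t := (index_of_neg_one_iff 0 t).mp hneg
        have hnotl : (0:Int) ∉ x :: t := by
          intro hc
          rw [List.mem_cons] at hc
          rcases hc with hc | hc
          · exact hx hc.symm
          · exact hnot hc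
        have hidx : index_of 0 (x :: t) = -1 := (index_of_neg_one_iff 0 _).mpr hnotl
        have hsl : PySem.List.slice (x :: t) (some ((-1 : Int) + 1)) none = x :: t := by
          norm_num
        rw [biggest_sum_eq, hidx, hsl, List.foldl_cons,
          show stepA (0, 0) x = (0, 0 + x) from by simp [stepA, hx],
          foldA_no_zero t hnot 0 _, hrB, row_best_eq, foldB_no_zero t hnot]
      · -- a zero exists in t: dropping the head commutes with the slice
        have hidx : index_of 0 (x :: t) = index_of 0 t + 1 := by
          simp only [index_of, hx, if_false]
          have h : index_of 0 t ≠ -1 := by omega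
          simp [h]
        have hA : biggest_sum (x :: t) = biggest_sum t := by
          rw [biggest_sum_eq, biggest_sum_eq, hidx]
          congr 1
          rw [PySem.List.slice_from _ (by omega), PySem.List.slice_from _ (by omega)]
          have h : (index_of 0 t + 1 + 1).toNat = (index_of 0 t + 1).toNat + 1 := by omega
          simp [h]
        rw [hA, hrB, ih]

-- the outer fold bodies, named
def gA (s : Int × Int) (p : Int × List Int) : Int × Int :=
  let curr := biggest_sum p.2
  if curr > s.1 then (curr, p.1) else s

def gB (s : Int × Int) (p : Int × List Int) : Int × Int :=
  let v := row_best p.2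
  if v > s.2 then (p.1, v) else s

-- A's (max_sum, max_index) fold is B's (best_i, best_s) fold with the pair swapped.
theorem foldA_swap_foldB (l : List (Int × List Int)) (ms mi : Int) :
    l.foldl gA (ms, mi) = ((l.foldl gB (mi, ms)).2, (l.foldl gB (mi, ms)).1) := by
  induction l generalizing ms mi with
  | nil => rfl
  | cons p t ih =>
    simp only [List.foldl_cons, gA, gB, biggest_sum_eq_row_best]
    by_cases h : row_best p.2 > ms <;> simp [h, ih]

theorem portA_eq (r : List Int) (rs : List (List Int)) :
    biggest_sum_row (r :: rs) =
      some (((PySem.List.enumerate (r :: rs) 0).foldl gA (0, 0)).2) := by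
  simp only [biggest_sum_row, if_neg (List.cons_ne_nil r rs)]
  rw [PySem.List.enumerate_eq_map_pyRange (r :: rs) ([] : List Int),
    List.foldl_map, PySem.List.len_eq]
  rfl

theorem portB_eq (r : List Int) (rs : List (List Int)) :
    biggest_sum_row_alt (r :: rs) =
      some (((PySem.List.enumerate (r :: rs) 0).foldl gB (0, 0)).1) := rfl

-- ===== VERDICT (by name: the statement is the Claim_ definition above) =====
theorem biggest_sum_row_spec : Claim_equal_biggest_sum_row := by
  intro mat _
  show biggest_sum_row mat = biggest_sum_row_alt mat
  match mat with
  | [] => rfl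
  | r :: rs =>
    rw [portA_eq, portB_eq, foldA_swap_foldB]
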